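-- pv_equiv track=rewrite | github.com/friveramariani/Bioinformatics_Specialization | 06_Finding_Mutations/SuffixTree.py | edge_len
-- ===== SOURCE A (Python) =====
-- def edge_len(node):
--     l = 0
--     for key, value in node.items():
--         if key == '_e':
--             l += len(node['_e'])
--         else:
--             l += 1
--     return l
-- ===== SOURCE B (Python) =====
-- def edge_len(node):
--     l = len(node)
--     if '_e' in node:
--         l += len(node['_e']) - 1
--     return l
-- ===== Notes on version B (the rewrite author's own statement) =====
-- stated objective: simpler
-- what changed: Replaces the per-key loop with a closed form: the dict's length plus an adjustment of len(node['_e']) - 1 when the '_e' key is present.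
import Mathlib
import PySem

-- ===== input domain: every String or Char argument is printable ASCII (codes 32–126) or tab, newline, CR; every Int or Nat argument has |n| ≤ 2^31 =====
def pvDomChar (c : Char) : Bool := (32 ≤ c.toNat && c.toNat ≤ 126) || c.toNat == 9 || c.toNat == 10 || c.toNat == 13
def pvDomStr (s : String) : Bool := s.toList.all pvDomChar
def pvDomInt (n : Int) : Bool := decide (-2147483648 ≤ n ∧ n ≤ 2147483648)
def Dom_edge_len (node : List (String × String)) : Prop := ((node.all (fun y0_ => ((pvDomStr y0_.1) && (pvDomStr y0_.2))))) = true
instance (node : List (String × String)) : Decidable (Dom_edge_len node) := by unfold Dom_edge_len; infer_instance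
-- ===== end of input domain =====

-- B computes the result in closed form (dict length plus an '_e' adjustment) instead of iterating the keys.

-- ===== PORT A =====
-- loop over node.items(); node['_e'] is the dict lookup on the whole node (first match; the key is present in that branch)
def edge_len (node : List (String × String)) : Int :=
  node.foldl (fun l kv =>
    if kv.1 = "_e" then l + PySem.Str.len ((PySem.Dict.mk node).getD "_e" "")
    else l + 1) 0

-- ===== PORT B =====
def edge_len_alt (node : List (String × String)) : Int :=
  let d := PySem.Dict.mk node
  let l : Int := PySem.Dict.size d
  if PySem.Dict.contains d "_e" then l + (PySem.Str.len (PySem.Dict.getD d "_e" "") - 1) else l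

-- ===== PRECONDITION & SPEC =====
-- Pre_ excludes association lists with duplicate keys, which do not encode any Python dict
-- (A's parameter is a dict, whose keys are unique); on such lists the encoding is ambiguous.
def Pre_edge_len (node : List (String × String)) : Prop := (node.map Prod.fst).Nodup
instance (node : List (String × String)) : Decidable (Pre_edge_len node) := by unfold Pre_edge_len; infer_instance
def pvWitness_edge_len : (List (String × String)) := [("_e", "ab"), ("x", "y")]

def Spec_edge_len (node : List (String × String)) (out : Int) : Prop := out = edge_len_alt node
instance (node : List (String × String)) (out : Int) : Decidable (Spec_edge_len node out) := by unfold Spec_edge_len; infer_instance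

-- ===== CLAIM (what is proved, stated in full; the proofs are below) =====
def Claim_equal_edge_len : Prop := ∀ (node : List (String × String)), Dom_edge_len node → Pre_edge_len node → Spec_edge_len node (edge_len node)

-- ===== LEMMAS AND PROOFS =====

-- the loop only ever adds the fixed constant L (for '_e') or 1, so it is linear in the counts
theorem edge_len_foldl_closed (xs : List (String × String)) (a L : Int) :
    xs.foldl (fun l kv => if kv.1 = "_e" then l + L else l + 1) a
      = a + (xs.length : Int) + ((xs.map Prod.fst).count "_e" : Int) * (L - 1) := by
  induction xs generalizing a with
  | nil => simp
  | cons kv t ih =>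
    simp only [List.foldl_cons, ih, List.map_cons, List.count_cons, List.length_cons]
    by_cases h : kv.1 = "_e"
    · simp [h]; ring
    · simp [h]; ring

theorem count_e_of_nodup (node : List (String × String)) (h : (node.map Prod.fst).Nodup) :
    ((node.map Prod.fst).count "_e" : Int)
      = (if (PySem.Dict.contains (PySem.Dict.mk node) "_e") then (1 : Int) else 0) := by
  have hc : (PySem.Dict.contains (PySem.Dict.mk node) "_e" = true) ↔ "_e" ∈ node.map Prod.fst := by
    rw [PySem.Dict.contains_iff_mem_keys]
    simp [PySem.Dict.keys]
  by_cases hm : "_e" ∈ node.map Prod.fst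
  · have hct := hc.mpr hm
    simp [hct, List.count_eq_one_of_mem h hm]
  · have hct : ¬ (PySem.Dict.contains (PySem.Dict.mk node) "_e" = true) := fun H => hm (hc.mp H)
    simp [hct, List.count_eq_zero_of_not_mem hm]

-- ===== VERDICT (by name: the statement is the Claim_ definition above) =====
theorem edge_len_spec : Claim_equal_edge_len := by
  intro node _ hpre
  unfold Spec_edge_len edge_len edge_len_alt
  rw [edge_len_foldl_closed, count_e_of_nodup node hpre]
  have hsize : PySem.Dict.size (PySem.Dict.mk node) = (node.length : Int) := by
    simp [PySem.Dict.size]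
  by_cases h : PySem.Dict.contains (PySem.Dict.mk node) "_e"
  · simp [h, hsize]
  · simp [h, hsize]
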